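-- pv_equiv track=rewrite | github.com/Pattarabordee/meter-anomaly-detection-platform | apps/model-adapter/scripts/hf_predict.py | summarize_items
-- ===== SOURCE A (Python) =====
-- from typing import Any, Dict, List, Tuple
--
-- def summarize_items(items: List[Dict[str, Any]]) -> Dict[str, int]:
--     summary = {"rows_total": len(items), "predicted_abnormal": 0, "high_risk": 0, "medium_risk": 0, "low_risk": 0}
--     for item in items:
--         if item.get("prediction") == "abnormal":
--             summary["predicted_abnormal"] += 1
--         risk = item.get("risk_level")
--         if risk == "high":
--             summary["high_risk"] += 1
--         elif risk == "medium":
--             summary["medium_risk"] += 1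
--         elif risk == "low":
--             summary["low_risk"] += 1
--     return summary
-- ===== SOURCE B (Python) =====
-- def summarize_items(items):
--     preds = [it.get("prediction") for it in items]
--     risks = [it.get("risk_level") for it in items]
--     return {
--         "rows_total": len(items),
--         "predicted_abnormal": preds.count("abnormal"),
--         "high_risk": risks.count("high"),
--         "medium_risk": risks.count("medium"),
--         "low_risk": risks.count("low"),
--     }
-- ===== Notes on version B (the rewrite author's own statement) =====
-- stated objective: idiomatic
-- what changed: Replaced the single mutate-a-dict loop with the if/elif chain by extracting the prediction and risk_level columns once and building the summary dict in one literal from list.count lookups.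
import Mathlib
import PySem

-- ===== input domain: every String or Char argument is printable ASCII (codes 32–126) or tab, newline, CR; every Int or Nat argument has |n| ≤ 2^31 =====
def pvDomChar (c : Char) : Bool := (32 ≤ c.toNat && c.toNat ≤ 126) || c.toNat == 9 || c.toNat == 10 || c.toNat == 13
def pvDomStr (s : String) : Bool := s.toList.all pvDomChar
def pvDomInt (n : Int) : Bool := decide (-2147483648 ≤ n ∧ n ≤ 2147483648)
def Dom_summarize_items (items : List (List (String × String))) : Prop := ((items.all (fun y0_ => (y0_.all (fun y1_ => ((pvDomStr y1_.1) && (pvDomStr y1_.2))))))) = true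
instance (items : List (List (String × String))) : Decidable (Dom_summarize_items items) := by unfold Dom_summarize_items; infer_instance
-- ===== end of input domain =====

-- B builds the summary dict in one literal from column extraction + list.count, instead of A's
-- in-place dict-mutation loop with an if/elif chain (objective: more idiomatic; same cost).

-- ===== PORT A =====
-- one loop iteration of A's for-loop over `items`
def summarizeStep (s : PySem.Dict String Int) (item : List (String × String)) : PySem.Dict String Int :=
  let d := PySem.Dict.mk item
  let s := if d.get? "prediction" == some "abnormal"
           then s.insert "predicted_abnormal" (s.getD "predicted_abnormal" 0 + 1) else s
  let risk := d.get? "risk_level"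
  if risk == some "high" then s.insert "high_risk" (s.getD "high_risk" 0 + 1)
  else if risk == some "medium" then s.insert "medium_risk" (s.getD "medium_risk" 0 + 1)
  else if risk == some "low" then s.insert "low_risk" (s.getD "low_risk" 0 + 1)
  else s

def summarize_items (items : List (List (String × String))) : List (String × Int) :=
  let summary : PySem.Dict String Int :=
    PySem.Dict.mk [("rows_total", (items.length : Int)), ("predicted_abnormal", 0),
                   ("high_risk", 0), ("medium_risk", 0), ("low_risk", 0)]
  (items.foldl summarizeStep summary).items

-- ===== PORT B =====
def summarize_items_alt (items : List (List (String × String))) : List (String × Int) :=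
  let preds := items.map (fun it => (PySem.Dict.mk it).get? "prediction")
  let risks := items.map (fun it => (PySem.Dict.mk it).get? "risk_level")
  [("rows_total", (items.length : Int)),
   ("predicted_abnormal", (preds.count (some "abnormal") : Int)),
   ("high_risk", (risks.count (some "high") : Int)),
   ("medium_risk", (risks.count (some "medium") : Int)),
   ("low_risk", (risks.count (some "low") : Int))]

-- ===== PRECONDITION & SPEC =====
def Spec_summarize_items (items : List (List (String × String))) (out : List (String × Int)) : Prop := out = summarize_items_alt items
instance (items : List (List (String × String))) (out : List (String × Int)) : Decidable (Spec_summarize_items items out) := by unfold Spec_summarize_items; infer_instance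

-- ===== CLAIM (what is proved, stated in full; the proofs are below) =====
def Claim_equal_summarize_items : Prop := ∀ (items : List (List (String × String))), Dom_summarize_items items → Spec_summarize_items items (summarize_items items)

-- ===== LEMMAS AND PROOFS =====

-- loop invariant: folding A's step over any 5-field summary dict adds the column counts
set_option maxHeartbeats 1600000 in
lemma summarize_loop (items : List (List (String × String))) (n a b c e : Int) :
    (items.foldl summarizeStep
      (PySem.Dict.mk [("rows_total", n), ("predicted_abnormal", a),
                      ("high_risk", b), ("medium_risk", c), ("low_risk", e)])).items
    = [("rows_total", n),
       ("predicted_abnormal", a + ((items.map (fun it => (PySem.Dict.mk it).get? "prediction")).count (some "abnormal") : Int)),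
       ("high_risk", b + ((items.map (fun it => (PySem.Dict.mk it).get? "risk_level")).count (some "high") : Int)),
       ("medium_risk", c + ((items.map (fun it => (PySem.Dict.mk it).get? "risk_level")).count (some "medium") : Int)),
       ("low_risk", e + ((items.map (fun it => (PySem.Dict.mk it).get? "risk_level")).count (some "low") : Int))] := by
  induction items generalizing a b c e with
  | nil => simp
  | cons it rest ih =>
    simp only [List.foldl_cons, List.map_cons, List.count_cons]
    have hstep : summarizeStep
        (PySem.Dict.mk [("rows_total", n), ("predicted_abnormal", a),
                        ("high_risk", b), ("medium_risk", c), ("low_risk", e)]) it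
      = PySem.Dict.mk [("rows_total", n),
          ("predicted_abnormal", a + if (PySem.Dict.mk it).get? "prediction" == some "abnormal" then 1 else 0),
          ("high_risk", b + if (PySem.Dict.mk it).get? "risk_level" == some "high" then 1 else 0),
          ("medium_risk", c + if (PySem.Dict.mk it).get? "risk_level" == some "medium" then 1 else 0),
          ("low_risk", e + if (PySem.Dict.mk it).get? "risk_level" == some "low" then 1 else 0)] := by
      simp only [summarizeStep]
      generalize (PySem.Dict.mk it).get? "prediction" = p
      generalize (PySem.Dict.mk it).get? "risk_level" = r
      apply PySem.Dict.ext
      split_ifs <;> simp only [add_zero] <;> first | rfl | (exfalso; simp_all)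
    rw [hstep, ih]
    simp only [List.cons.injEq, Prod.mk.injEq, and_true, true_and, beq_iff_eq]
    refine ⟨?_, ?_, ?_, ?_⟩ <;> split_ifs <;> push_cast <;> ring

theorem summarize_items_spec_aux (items : List (List (String × String))) :
    summarize_items items = summarize_items_alt items := by
  unfold summarize_items summarize_items_alt
  rw [summarize_loop]
  simp

-- ===== VERDICT (by name: the statement is the Claim_ definition above) =====
theorem summarize_items_spec : Claim_equal_summarize_items := by
  intro items _
  unfold Spec_summarize_items
  exact summarize_items_spec_aux items
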